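-- pv_equiv track=rewrite | github.com/stephenxu10/Clash-Royale-Heroes-Analysis | src/main.py | stirling
-- ===== SOURCE A (Python) =====
-- def stirling(x: int) -> list:
--     """
--     This function calculates the number of ways to partition the
--     set [x] = {1, 2, ..., x} into y non-empty groups, where x and y
--     are positive integers.  We use bottom-up dynamic programming to do so. See the PDF
--     for a derivation of this recursion + its relevance to broader hero problem.
--
--     DP is perhaps a smidge more efficient than using the direct formula
--     since we compute a whole batch of stirling numbers at once.
--
--     Returns:
--         - a list of integers l, where l[y] = S(x, y) for all 0 <= y <= x.
--     """
--     assert(x > 0)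
--
--     dp = [[0 for _ in range(x+1)] for _ in range(x+1)]
--
--     # Base Case
--     dp[0][0] = 1
--
--     # Bottom-up table filling
--     for i in range(1, x + 1):
--         for j in range(1, i + 1):
--             dp[i][j] = dp[i-1][j-1] + j * dp[i-1][j]
--
--     return dp[x]
-- ===== SOURCE B (Python) =====
-- import math
--
-- def stirling(x: int) -> list:
--     """
--     Row x of the Stirling numbers of the second kind, computed via forward
--     differences: y! * S(x, y) is the y-th forward difference at 0 of f(m) = m**x,
--     so we start from [m**x for m in 0..x] and repeatedly take differences.
--     """
--     assert(x > 0)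
--     d = [m ** x for m in range(x + 1)]
--     l = []
--     for y in range(x + 1):
--         l.append(d[0] // math.factorial(y))
--         d = [d[i + 1] - d[i] for i in range(len(d) - 1)]
--     return l
-- ===== Notes on version B (the rewrite author's own statement) =====
-- stated objective: alternative
-- what changed: Replaces A's (x+1)x(x+1) bottom-up DP table built from the recurrence S(i,j)=S(i-1,j-1)+j*S(i-1,j) with the forward-difference method: start from [m**x for m in 0..x], take the y-th forward difference at 0 and exact-divide by y!, since y!*S(x,y) is the y-th finite difference of m^x at 0.
import Mathlib
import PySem

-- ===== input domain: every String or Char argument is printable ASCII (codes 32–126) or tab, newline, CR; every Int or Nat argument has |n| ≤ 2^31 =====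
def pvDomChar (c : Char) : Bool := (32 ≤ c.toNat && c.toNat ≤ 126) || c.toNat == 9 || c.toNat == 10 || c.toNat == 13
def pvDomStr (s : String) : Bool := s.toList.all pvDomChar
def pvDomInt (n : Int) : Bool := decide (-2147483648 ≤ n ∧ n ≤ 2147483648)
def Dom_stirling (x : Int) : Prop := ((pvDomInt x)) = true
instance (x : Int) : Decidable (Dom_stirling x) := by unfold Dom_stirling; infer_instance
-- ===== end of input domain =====

-- B computes row x of the Stirling numbers via the forward-difference operator
-- (y!*S(x,y) = Δ^y m^x at 0) instead of filling A's 2-D DP table (alternative algorithm,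
-- proved equal on x > 0; on x ≤ 0 A's assert raises, excluded by Pre_stirling).

-- ===== PORT A =====
-- Literal port of A's bottom-up DP. `dp[i][j] = v` is `pySetD dp i (pySetD dp[i] j v)`;
-- all indices produced by the loops are in range, so pyGetD/pySetD do exactly what Python does.
-- On x ≤ 0 Python's `assert x > 0` raises AssertionError: excluded by Pre_stirling ([] here).
def stirlingBody (dp : List (List Int)) (i j : Int) : List (List Int) :=
  PySem.List.pySetD dp i (PySem.List.pySetD (PySem.List.pyGetD dp i [])
    j (PySem.List.pyGetD (PySem.List.pyGetD dp (i-1) []) (j-1) 0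
       + j * PySem.List.pyGetD (PySem.List.pyGetD dp (i-1) []) j 0))

def stirlingInner (dp : List (List Int)) (i : Int) : List (List Int) :=
  (PySem.List.pyRange 1 (i+1) 1).foldl (fun dp j => stirlingBody dp i j) dp

-- dp0: the (x+1) x (x+1) zero table; stirlingInit: dp0 after `dp[0][0] = 1`
def stirlingZeros (x : Int) : List (List Int) :=
  (PySem.List.pyRange 0 (x+1) 1).map (fun _ => (PySem.List.pyRange 0 (x+1) 1).map (fun _ => (0:Int)))

def stirlingInit (x : Int) : List (List Int) :=
  PySem.List.pySetD (stirlingZeros x) 0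
    (PySem.List.pySetD (PySem.List.pyGetD (stirlingZeros x) 0 []) 0 1)

def stirling (x : Int) : List Int :=
  if 0 < x then
    PySem.List.pyGetD
      ((PySem.List.pyRange 1 (x+1) 1).foldl (fun dp i => stirlingInner dp i) (stirlingInit x))
      x []
  else []

-- ===== PORT B =====
-- Literal port of Source B: start from d = [m**x for m in 0..x] and repeatedly take forward
-- differences; entry y is d[0] // y!.  len → PySem.List.len, math.factorial → Nat.factorial,
-- '//' → PySem.Int.floordiv; m ** x uses the Nat exponent x.toNat (x > 0 wherever evaluated);
-- d[i] / d[i+1] indices are in range, so pyGetD reads exactly what Python does.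
def stirlingDiff (d : List Int) : List Int :=
  (PySem.List.pyRange 0 (PySem.List.len d - 1) 1).map
    (fun i => PySem.List.pyGetD d (i+1) 0 - PySem.List.pyGetD d i 0)

def stirling_alt (x : Int) : List Int :=
  if 0 < x then
    ((PySem.List.pyRange 0 (x+1) 1).foldl
      (fun (st : List Int × List Int) y =>
        (st.1 ++ [PySem.Int.floordiv (PySem.List.pyGetD st.2 0 0) (Nat.factorial y.toNat : Int)],
         stirlingDiff st.2))
      ([], (PySem.List.pyRange 0 (x+1) 1).map (fun m => m ^ x.toNat))).1
  else []

-- ===== PRECONDITION & SPEC =====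
-- Pre_ excludes exactly x ≤ 0, where A's `assert x > 0` raises AssertionError.
def Pre_stirling (x : Int) : Prop := 0 < x
instance (x : Int) : Decidable (Pre_stirling x) := by unfold Pre_stirling; infer_instance
def pvWitness_stirling : Int := (3)

def Spec_stirling (x : Int) (out : List Int) : Prop := out = stirling_alt x
instance (x : Int) (out : List Int) : Decidable (Spec_stirling x out) := by unfold Spec_stirling; infer_instance

-- ===== CLAIM (what is proved, stated in full; the proofs are below) =====
def Claim_equal_stirling : Prop := ∀ (x : Int), Dom_stirling x → Pre_stirling x → Spec_stirling x (stirling x)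

-- ===== LEMMAS AND PROOFS =====

-- mathematical Stirling-number recurrence, the common characterisation of both ports
def S2 : Nat → Nat → Int
  | 0, 0 => 1
  | 0, _+1 => 0
  | _+1, 0 => 0
  | n+1, j+1 => S2 n j + ((j:Int)+1) * S2 n (j+1)

theorem S2_zero_of_lt : ∀ n j : Nat, n < j → S2 n j = 0 := by
  intro n
  induction n with
  | zero => intro j hj; cases j with
    | zero => omega
    | succ j => rfl
  | succ n ih => intro j hj; cases j with
    | zero => omega
    | succ j =>
      show S2 n j + ((j:Int)+1) * S2 n (j+1) = 0
      rw [ih j (by omega), ih (j+1) (by omega)]; ring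

-- rows and partial tables of A's DP
def rowS (n r : Nat) : List Int := (List.range (n+1)).map (fun j => S2 r j)
def prow (n i j : Nat) : List Int :=
  (List.range (n+1)).map (fun t => if 1 ≤ t ∧ t ≤ j then S2 i t else 0)
def tbl (n i j : Nat) : List (List Int) :=
  (List.range (n+1)).map (fun r => if r < i then rowS n r else if r = i then prow n i j else prow n r 0)

theorem pySetD_zero {α : Type} (xs : List α) (v : α) :
    PySem.List.pySetD xs (0:Int) v = xs.set 0 v := by
  simpa using PySem.List.pySetD_natCast xs 0 v

theorem set_map_range {β : Type} (f : Nat → β) (m p : Nat) (v : β) :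
    ((List.range m).map f).set p v = (List.range m).map (fun t => if t = p then v else f t) := by
  apply List.ext_getElem
  · simp
  · intro t h1 h2
    simp only [List.getElem_set, List.getElem_map, List.getElem_range]
    by_cases h : p = t
    · subst h; simp
    · rw [if_neg h, if_neg (fun ht => h ht.symm)]

theorem body_tbl (n i j : Nat) (hin : i ≤ n) (hj : j + 1 ≤ i) :
    stirlingBody (tbl n i j) (i:Int) ((j:Int)+1) = tbl n i (j+1) := by
  obtain ⟨i', rfl⟩ : ∃ i', i = i' + 1 := ⟨i - 1, by omega⟩
  unfold stirlingBody
  rw [show ((i'+1:Nat):Int) - 1 = ((i':Nat):Int) by push_cast; ring,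
      show ((j:Nat):Int) + 1 = ((j+1:Nat):Int) by push_cast; ring,
      show ((j+1:Nat):Int) - 1 = ((j:Nat):Int) by push_cast; ring]
  rw [PySem.List.pySetD_natCast, PySem.List.pySetD_natCast,
      PySem.List.pyGetD_natCast, PySem.List.pyGetD_natCast, PySem.List.pyGetD_natCast,
      PySem.List.pyGetD_natCast]
  have hrow : (tbl n (i'+1) j).getD i' [] = rowS n i' := by
    unfold tbl
    rw [PySem.List.getD_map_range _ _ _ _ (by omega)]
    rw [if_pos (by omega)]
  have hcur : (tbl n (i'+1) j).getD (i'+1) [] = prow n (i'+1) j := by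
    unfold tbl
    rw [PySem.List.getD_map_range _ _ _ _ (by omega)]
    rw [if_neg (by omega), if_pos rfl]
  rw [hrow, hcur]
  have hg1 : (rowS n i').getD j 0 = S2 i' j := by
    unfold rowS; rw [PySem.List.getD_map_range _ _ _ _ (by omega)]
  have hg2 : (rowS n i').getD (j+1) 0 = S2 i' (j+1) := by
    unfold rowS; rw [PySem.List.getD_map_range _ _ _ _ (by omega)]
  rw [hg1, hg2]
  have hv : S2 i' j + (((j:Nat):Int)+1) * S2 i' (j+1) = S2 (i'+1) (j+1) := rfl
  have hv' : S2 i' j + ((j+1:Nat):Int) * S2 i' (j+1) = S2 (i'+1) (j+1) := by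
    push_cast; exact hv
  rw [hv']
  have hsetrow : (prow n (i'+1) j).set (j+1) (S2 (i'+1) (j+1)) = prow n (i'+1) (j+1) := by
    unfold prow
    rw [set_map_range]
    apply List.map_congr_left
    intro t ht
    by_cases h : t = j+1
    · subst h; rw [if_pos rfl, if_pos (by omega)]
    · rw [if_neg h]
      have : (1 ≤ t ∧ t ≤ j) ↔ (1 ≤ t ∧ t ≤ j+1) := by omega
      simp only [this]
  rw [hsetrow]
  unfold tbl
  rw [set_map_range]
  apply List.map_congr_left
  intro r hr
  by_cases h : r = i'+1
  · subst h; rw [if_pos rfl, if_neg (by omega), if_pos rfl]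
  · rw [if_neg h]
    by_cases h1 : r < i'+1
    · rw [if_pos h1, if_pos h1]
    · rw [if_neg h1, if_neg h1, if_neg h, if_neg h]

theorem inner_tbl (n i : Nat) (hin : i ≤ n) :
    ∀ j : Nat, j ≤ i →
    (PySem.List.pyRange 1 ((j:Int)+1) 1).foldl (fun dp j => stirlingBody dp (i:Int) j) (tbl n i 0)
      = tbl n i j := by
  intro j
  induction j with
  | zero =>
    intro _
    rw [show ((0:Nat):Int) + 1 = 1 by norm_num, PySem.List.pyRange_one_eq_nil le_rfl]
    rfl
  | succ j ih =>
    intro hj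
    rw [show ((j+1:Nat):Int) + 1 = (((j:Nat):Int)+1) + 1 by push_cast; ring,
        PySem.List.pyRange_one_succ_right (by omega), List.foldl_append,
        ih (by omega)]
    simp only [List.foldl]
    exact body_tbl n i j hin (by omega)

theorem prow_full (n r : Nat) (hr : 1 ≤ r) : prow n r r = rowS n r := by
  unfold prow rowS
  apply List.map_congr_left
  intro t ht
  by_cases hc : 1 ≤ t ∧ t ≤ r
  · rw [if_pos hc]
  · rw [if_neg hc]
    rcases Nat.eq_zero_or_pos t with h0 | h0
    · subst h0
      obtain ⟨r', rfl⟩ : ∃ r', r = r' + 1 := ⟨r - 1, by omega⟩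
      rfl
    · exact (S2_zero_of_lt r t (by omega)).symm

theorem tbl_switch (n i : Nat) (hi : 1 ≤ i) : tbl n i i = tbl n (i+1) 0 := by
  unfold tbl
  apply List.map_congr_left
  intro r hr
  by_cases h1 : r < i
  · rw [if_pos h1, if_pos (by omega)]
  · by_cases h2 : r = i
    · subst h2
      rw [if_neg h1, if_pos rfl, if_pos (by omega)]
      exact prow_full n r hi
    · rw [if_neg h1, if_neg h2, if_neg (by omega)]
      by_cases h3 : r = i+1
      · subst h3; rw [if_pos rfl]
      · rw [if_neg h3]

theorem innerFull_tbl (n i : Nat) (hi : 1 ≤ i) (hin : i ≤ n) :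
    stirlingInner (tbl n i 0) (i:Int) = tbl n (i+1) 0 := by
  unfold stirlingInner
  rw [inner_tbl n i hin i le_rfl, tbl_switch n i hi]

theorem outer_tbl (n : Nat) :
    ∀ i : Nat, i ≤ n →
    (PySem.List.pyRange 1 ((i:Int)+1) 1).foldl (fun dp i => stirlingInner dp i) (tbl n 1 0)
      = tbl n (i+1) 0 := by
  intro i
  induction i with
  | zero =>
    intro _
    rw [show ((0:Nat):Int) + 1 = 1 by norm_num, PySem.List.pyRange_one_eq_nil le_rfl]
    rfl
  | succ i ih =>
    intro hi
    rw [show ((i+1:Nat):Int) + 1 = (((i:Nat):Int)+1) + 1 by push_cast; ring,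
        PySem.List.pyRange_one_succ_right (by omega), List.foldl_append,
        ih (by omega)]
    simp only [List.foldl]
    rw [show ((i:Nat):Int) + 1 = ((i+1:Nat):Int) by push_cast; ring]
    exact innerFull_tbl n (i+1) (by omega) hi

theorem init_tbl (n : Nat) (hn : 1 ≤ n) : stirlingInit ((n:Int)) = tbl n 1 0 := by
  unfold stirlingInit stirlingZeros
  rw [show ((n:Nat):Int) + 1 = ((n+1:Nat):Int) by push_cast; ring,
      PySem.List.pyRange_zero_natCast, List.map_map, List.map_map]
  simp only [Function.comp_def]
  rw [PySem.List.pyGetD_zero, pySetD_zero, pySetD_zero,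
      PySem.List.getD_map_range _ _ _ _ (by omega),
      set_map_range, set_map_range]
  unfold tbl
  apply List.map_congr_left
  intro r hr
  by_cases h0 : r = 0
  · subst h0
    rw [if_pos rfl, if_pos (by omega)]
    unfold rowS
    apply List.map_congr_left
    intro t ht
    by_cases ht0 : t = 0
    · subst ht0; rw [if_pos rfl]; rfl
    · rw [if_neg ht0]
      obtain ⟨t', rfl⟩ : ∃ t', t = t' + 1 := ⟨t - 1, by omega⟩
      rfl
  · rw [if_neg h0, if_neg (by omega)]
    have hz : ∀ s : Nat, List.map (fun _ => (0:Int)) (List.range (n+1)) = prow n s 0 := by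
      intro s
      unfold prow
      apply List.map_congr_left
      intro t ht
      rw [if_neg (by omega)]
    by_cases h1 : r = 1
    · subst h1; rw [if_pos rfl]; exact hz 1
    · rw [if_neg h1]; exact hz r

theorem stirling_char (n : Nat) (hn : 1 ≤ n) : stirling (n:Int) = rowS n n := by
  unfold stirling
  rw [if_pos (by exact_mod_cast hn)]
  rw [init_tbl n hn, outer_tbl n n le_rfl, PySem.List.pyGetD_natCast]
  unfold tbl
  rw [PySem.List.getD_map_range _ _ _ _ (by omega)]
  rw [if_pos (by omega)]

-- ===== B-side characterisation =====

def gSum (n j : Nat) : Int :=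
  ∑ k ∈ Finset.range (j+1), (-1:Int)^k * (j.choose k : Int) * ((j - k : Nat) : Int)^n

theorem gSum_zero (j : Nat) : gSum 0 j = if j = 0 then 1 else 0 := by
  simpa [gSum] using Int.alternating_sum_range_choose (n := j)

theorem gSum_succ_zero (n : Nat) : gSum (n+1) 0 = 0 := by
  simp [gSum]

theorem gSum_succ_succ (n j : Nat) :
    gSum (n+1) (j+1) = ((j:Int)+1) * (gSum n j + gSum n (j+1)) := by
  have hU0 : ∑ k ∈ Finset.range (j+1), (-1:Int)^k * (j.choose (k+1) : Int) * ((j - k : Nat) : Int)^n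
      = ∑ k ∈ Finset.range j, (-1:Int)^k * (j.choose (k+1) : Int) * ((j - k : Nat) : Int)^n := by
    rw [Finset.sum_range_succ, Nat.choose_succ_self]
    simp
  set U : Int := ∑ k ∈ Finset.range j, (-1:Int)^k * (j.choose (k+1) : Int) * ((j - k : Nat) : Int)^n with hUdef
  set T : Int := ∑ k ∈ Finset.range (j+1), (-1:Int)^k * (j.choose k : Int) * ((j + 1 - k : Nat) : Int)^n with hTdef
  have hT : T = ((j+1:Nat):Int)^n - U := by
    rw [hTdef, Finset.sum_range_succ' (fun k => (-1:Int)^k * (j.choose k : Int) * ((j + 1 - k : Nat) : Int)^n) j]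
    have : ∀ k ∈ Finset.range j,
        (-1:Int)^(k+1) * (j.choose (k+1) : Int) * ((j + 1 - (k+1) : Nat) : Int)^n
          = -((-1:Int)^k * (j.choose (k+1) : Int) * ((j - k : Nat) : Int)^n) := by
      intro k hk
      rw [show j + 1 - (k+1) = j - k by omega]
      ring
    rw [Finset.sum_congr rfl this, Finset.sum_neg_distrib]
    simp; ring
  have hg1 : gSum n (j+1) = ((j+1:Nat):Int)^n - gSum n j - U := by
    rw [gSum, Finset.sum_range_succ' (fun k => (-1:Int)^k * ((j+1).choose k : Int) * ((j + 1 - k : Nat) : Int)^n) (j+1)]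
    have : ∀ k ∈ Finset.range (j+1),
        (-1:Int)^(k+1) * ((j+1).choose (k+1) : Int) * ((j + 1 - (k+1) : Nat) : Int)^n
          = -((-1:Int)^k * (j.choose k : Int) * ((j - k : Nat) : Int)^n)
            - ((-1:Int)^k * (j.choose (k+1) : Int) * ((j - k : Nat) : Int)^n) := by
      intro k hk
      rw [show j + 1 - (k+1) = j - k by omega, Nat.choose_succ_succ]
      push_cast
      ring
    rw [Finset.sum_congr rfl this, Finset.sum_sub_distrib, Finset.sum_neg_distrib, ← gSum, ← hU0]
    simp; ring
  have hstep1 : gSum (n+1) (j+1) = ((j:Int)+1) * T := by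
    rw [gSum, Finset.sum_range_succ]
    rw [show ((j + 1 - (j+1) : Nat) : Int) = 0 by norm_num]
    rw [zero_pow (by omega : n+1 ≠ 0), mul_zero, add_zero, hTdef, Finset.mul_sum]
    apply Finset.sum_congr rfl
    intro k hk
    have hk' : k ≤ j := by simpa [Nat.lt_succ_iff] using hk
    have hc : ((j+1).choose k : Int) * ((j + 1 - k : Nat) : Int) = ((j:Int)+1) * (j.choose k : Int) := by
      have h2 : ((j.choose k : Nat) : Int) * (((j:Nat):Int)+1) = (((j+1).choose k : Nat) : Int) * ((j+1-k : Nat) : Int) := by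
        exact_mod_cast Nat.choose_mul_succ_eq j k
      linear_combination -h2
    calc (-1:Int)^k * ((j+1).choose k : Int) * ((j + 1 - k : Nat) : Int)^(n+1)
        = ((-1:Int)^k * ((j + 1 - k : Nat) : Int)^n) * (((j+1).choose k : Int) * ((j + 1 - k : Nat) : Int)) := by ring
      _ = ((-1:Int)^k * ((j + 1 - k : Nat) : Int)^n) * (((j:Int)+1) * (j.choose k : Int)) := by rw [hc]
      _ = ((j:Int)+1) * ((-1:Int)^k * (j.choose k : Int) * ((j + 1 - k : Nat) : Int)^n) := by ring
  rw [hstep1, hT]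
  have : gSum n j + gSum n (j+1) = ((j+1:Nat):Int)^n - U := by rw [hg1]; ring
  rw [this]

theorem gSum_eq (n : Nat) : ∀ j : Nat, gSum n j = (j.factorial : Int) * S2 n j := by
  induction n with
  | zero =>
    intro j
    cases j with
    | zero => simp [gSum_zero, S2, Nat.factorial]
    | succ j => simp [gSum_zero, show S2 0 (j+1) = 0 from rfl]
  | succ n ih =>
    intro j
    cases j with
    | zero => simp [gSum_succ_zero, show S2 (n+1) 0 = 0 from rfl]
    | succ j =>
      rw [gSum_succ_succ, ih j, ih (j+1),
          show S2 (n+1) (j+1) = S2 n j + ((j:Int)+1) * S2 n (j+1) from rfl]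
      push_cast [Nat.factorial_succ]
      ring

def G (n i y : Nat) : Int :=
  ∑ k ∈ Finset.range (y+1), (-1:Int)^k * (y.choose k : Int) * ((i + (y - k) : Nat) : Int)^n

theorem G_zero_left (n y : Nat) : G n 0 y = gSum n y := by
  unfold G gSum
  apply Finset.sum_congr rfl
  intro k hk
  norm_num

theorem G_zero_right (n i : Nat) : G n i 0 = ((i:Nat):Int)^n := by
  simp [G]

theorem G_step (n i y : Nat) : G n i (y+1) = G n (i+1) y - G n i y := by
  have hU0 : ∑ k ∈ Finset.range (y+1), (-1:Int)^k * (y.choose (k+1) : Int) * ((i + (y - k) : Nat):Int)^n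
      = ∑ k ∈ Finset.range y, (-1:Int)^k * (y.choose (k+1) : Int) * ((i + (y - k) : Nat):Int)^n := by
    rw [Finset.sum_range_succ, Nat.choose_succ_self]
    simp
  set U : Int := ∑ k ∈ Finset.range y, (-1:Int)^k * (y.choose (k+1) : Int) * ((i + (y - k) : Nat):Int)^n with hUdef
  have hL : G n i (y+1) = ((i + (y+1) : Nat):Int)^n - G n i y - U := by
    rw [G, Finset.sum_range_succ' (fun k => (-1:Int)^k * ((y+1).choose k : Int) * ((i + (y + 1 - k) : Nat):Int)^n) (y+1)]
    have : ∀ k ∈ Finset.range (y+1),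
        (-1:Int)^(k+1) * ((y+1).choose (k+1) : Int) * ((i + (y + 1 - (k+1)) : Nat):Int)^n
          = -((-1:Int)^k * (y.choose k : Int) * ((i + (y - k) : Nat):Int)^n)
            - ((-1:Int)^k * (y.choose (k+1) : Int) * ((i + (y - k) : Nat):Int)^n) := by
      intro k hk
      rw [show y + 1 - (k+1) = y - k by omega, Nat.choose_succ_succ]
      push_cast
      ring
    rw [Finset.sum_congr rfl this, Finset.sum_sub_distrib, Finset.sum_neg_distrib, ← G, ← hU0]
    simp
    ring
  have hR : G n (i+1) y = ((i + (y+1) : Nat):Int)^n - U := by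
    rw [G, Finset.sum_range_succ' (fun k => (-1:Int)^k * (y.choose k : Int) * ((i + 1 + (y - k) : Nat):Int)^n) y]
    have : ∀ k ∈ Finset.range y,
        (-1:Int)^(k+1) * (y.choose (k+1) : Int) * ((i + 1 + (y - (k+1)) : Nat):Int)^n
          = -((-1:Int)^k * (y.choose (k+1) : Int) * ((i + (y - k) : Nat):Int)^n) := by
      intro k hk
      have hk' : k < y := Finset.mem_range.mp hk
      rw [show i + 1 + (y - (k+1)) = i + (y - k) by omega]
      ring
    rw [Finset.sum_congr rfl this, Finset.sum_neg_distrib, hUdef,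
        show i + 1 + (y - 0) = i + (y+1) by omega, Nat.choose_zero_right, Nat.cast_one]
    ring
  rw [hL, hR]
  ring

theorem diff_step (n y m : Nat) (hm : 1 ≤ m) :
    stirlingDiff ((List.range m).map (fun i => G n i y))
      = (List.range (m-1)).map (fun i => G n i (y+1)) := by
  unfold stirlingDiff
  have hlen : PySem.List.len ((List.range m).map (fun i => G n i y)) = (m:Int) := by simp
  rw [hlen, show (m:Int) - 1 = ((m-1:Nat):Int) by omega,
      PySem.List.pyRange_zero_natCast, List.map_map]
  apply List.map_congr_left
  intro i hi
  have hi' : i < m-1 := List.mem_range.mp hi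
  simp only [Function.comp_apply]
  rw [show ((i:Nat):Int) + 1 = ((i+1:Nat):Int) by push_cast; ring,
      PySem.List.pyGetD_natCast, PySem.List.pyGetD_natCast,
      PySem.List.getD_map_range _ _ _ _ (by omega),
      PySem.List.getD_map_range _ _ _ _ (by omega)]
  exact (G_step n i y).symm

theorem head_val (n y m : Nat) (hm : 1 ≤ m) :
    PySem.Int.floordiv (PySem.List.pyGetD ((List.range m).map (fun i => G n i y)) 0 0)
      ((y.factorial : Nat) : Int) = S2 n y := by
  rw [PySem.List.pyGetD_zero, PySem.List.getD_map_range _ _ _ _ (by omega),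
      G_zero_left, gSum_eq n y,
      PySem.Int.floordiv_eq_ediv_of_pos (by exact_mod_cast y.factorial_pos)]
  exact Int.mul_ediv_cancel_left _ (by exact_mod_cast y.factorial_ne_zero)

theorem fold_invariant (n : Nat) :
    ∀ Y : Nat, Y ≤ n+1 →
    (PySem.List.pyRange 0 ((Y:Int)) 1).foldl
      (fun (st : List Int × List Int) y =>
        (st.1 ++ [PySem.Int.floordiv (PySem.List.pyGetD st.2 0 0) (Nat.factorial y.toNat : Int)],
         stirlingDiff st.2))
      ([], (List.range (n+1)).map (fun i => G n i 0))
      = ((List.range Y).map (fun y => S2 n y), (List.range (n+1-Y)).map (fun i => G n i Y)) := by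
  intro Y
  induction Y with
  | zero =>
    intro _
    rw [show ((0:Nat):Int) = 0 by norm_num, PySem.List.pyRange_one_eq_nil le_rfl]
    simp
  | succ Y ih =>
    intro hY
    rw [show ((Y+1:Nat):Int) = ((Y:Nat):Int) + 1 by push_cast; ring,
        PySem.List.pyRange_one_succ_right (by omega), List.foldl_append, ih (by omega)]
    simp only [List.foldl]
    have h1 : 1 ≤ n+1-Y := by omega
    rw [Int.toNat_natCast, head_val n Y (n+1-Y) h1, diff_step n Y (n+1-Y) h1,
        show n+1-Y-1 = n+1-(Y+1) by omega, List.range_succ, List.map_append, List.map_singleton]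

theorem stirling_alt_char (n : Nat) (hn : 1 ≤ n) : stirling_alt (n:Int) = rowS n n := by
  unfold stirling_alt
  rw [if_pos (by exact_mod_cast hn)]
  have hinit : (PySem.List.pyRange 0 ((n:Int)+1) 1).map (fun m => m ^ ((n:Int)).toNat)
      = (List.range (n+1)).map (fun i => G n i 0) := by
    rw [show ((n:Nat):Int) + 1 = ((n+1:Nat):Int) by push_cast; ring,
        PySem.List.pyRange_zero_natCast, List.map_map]
    apply List.map_congr_left
    intro m hm
    simp only [Function.comp_apply, Int.toNat_natCast]
    exact (G_zero_right n m).symm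
  rw [hinit, show ((n:Nat):Int) + 1 = ((n+1:Nat):Int) by push_cast; ring,
      fold_invariant n (n+1) le_rfl]
  rfl

-- ===== VERDICT (by name: the statement is the Claim_ definition above) =====
theorem stirling_spec : Claim_equal_stirling := by
  intro x _ hpre
  unfold Spec_stirling
  have hx0 : 0 < x := hpre
  have hx : x = ((x.toNat : Nat) : Int) := (Int.toNat_of_nonneg (le_of_lt hx0)).symm
  have hn : 1 ≤ x.toNat := by omega
  rw [hx, stirling_char x.toNat hn, stirling_alt_char x.toNat hn]
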